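-- pv_equiv track=rewrite | github.com/szhx/Python | University projects/a03/a03q1.py | check_upper
-- ===== SOURCE A (Python) =====
-- def check_upper(s, i):
--     if i == -1:
--         return 0
--     else:
--         if s[i].isupper():
--             return 1 + check_upper(s, i-1)
--         else:
--             return check_upper(s, i-1)
-- ===== SOURCE B (Python) =====
-- def check_upper(s, i):
--     return sum(1 for c in s[:i+1] if c.isupper())
-- ===== Notes on version B (the rewrite author's own statement) =====
-- stated objective: simpler
-- what changed: Replaced the i-to--1 tail recursion with a single slice comprehension summing 1 per uppercase character of s[:i+1].
-- crash fix: A raises IndexError (or RecursionError) whenever i >= len(s) or i < -1; B simply counts the uppercase characters of the slice s[:i+1] and returns an int there. — e.g. on check_upper("Ab", 5): A raises IndexError, B returns 1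
import Mathlib
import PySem

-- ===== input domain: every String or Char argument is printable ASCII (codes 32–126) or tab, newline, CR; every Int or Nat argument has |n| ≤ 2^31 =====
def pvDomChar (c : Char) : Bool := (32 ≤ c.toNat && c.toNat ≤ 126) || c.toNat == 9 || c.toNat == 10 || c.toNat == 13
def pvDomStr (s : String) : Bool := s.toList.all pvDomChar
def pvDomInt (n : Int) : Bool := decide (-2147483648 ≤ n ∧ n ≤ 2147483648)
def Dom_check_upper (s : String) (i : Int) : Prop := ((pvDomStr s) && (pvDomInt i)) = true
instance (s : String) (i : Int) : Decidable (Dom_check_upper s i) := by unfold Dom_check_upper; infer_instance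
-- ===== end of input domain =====

-- B replaces A's tail recursion by one slice comprehension over s[:i+1]; objective: simpler.

-- ===== PORT A =====
-- termination helper for the port's recursion (cited by name in decreasing_by)
theorem pvGetSomeLB {s : String} {i : Int} {c : Char}
    (h : PySem.Str.pyGet? s i = some c) : -(s.length : Int) ≤ i := by
  have h' : PySem.List.pyGet? s.toList i = some c := by
    rw [← PySem.Chars.pyGet?_eq_listPyGet?, ← PySem.Str.pyGet?_eq]; exact h
  by_contra hlt
  have hnone : PySem.List.pyGet? s.toList i = none := by
    rw [PySem.List.pyGet?_eq_none_iff]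
    intro hr
    unfold PySem.Raise.InRange at hr
    rw [String.length_toList] at hr
    exact hlt hr.1
  rw [hnone] at h'
  cases h' 

def check_upper (s : String) (i : Int) : Int :=
  if i = -1 then 0
  else
    match h : PySem.Str.pyGet? s i with
    | none => 0  -- Python raises IndexError here; excluded by Pre_check_upper
    | some c =>
      if PySem.Chars.isupper c then 1 + check_upper s (i - 1)
      else check_upper s (i - 1)
termination_by (i + s.length + 1).toNat
decreasing_by
  all_goals
    have := pvGetSomeLB h
    omega

-- ===== PORT B =====
def check_upper_alt (s : String) (i : Int) : Int :=
  ((PySem.Str.slice s none (some (i + 1))).toList.countP PySem.Chars.isupper : Int)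

-- ===== PRECONDITION & SPEC =====
-- Pre_ excludes exactly the inputs where A raises (IndexError / RecursionError): i ≥ len(s) or i < -1.
def Pre_check_upper (s : String) (i : Int) : Prop := -1 ≤ i ∧ i < (s.length : Int)
instance (s : String) (i : Int) : Decidable (Pre_check_upper s i) := by
  unfold Pre_check_upper; infer_instance

def pvWitness_check_upper : String × Int := ("Hello World", 7)

-- A raises IndexError (or RecursionError) whenever i >= len(s) or i < -1; B counts the uppercase characters of s[:i+1] there.
def Raises_check_upper (s : String) (i : Int) : Prop := i < -1 ∨ (s.length : Int) ≤ i
instance (s : String) (i : Int) : Decidable (Raises_check_upper s i) := by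
  unfold Raises_check_upper; infer_instance
def pvRaiseWitness_check_upper : String × Int := ("Ab", 5)
def pvRaiseWitnessOut_check_upper : Int := 1

def Spec_check_upper (s : String) (i : Int) (out : Int) : Prop := out = check_upper_alt s i
instance (s : String) (i : Int) (out : Int) : Decidable (Spec_check_upper s i out) := by
  unfold Spec_check_upper; infer_instance

-- ===== CLAIM (what is proved, stated in full; the proofs are below) =====
def Claim_equal_check_upper : Prop := ∀ (s : String) (i : Int), Dom_check_upper s i → Pre_check_upper s i → Spec_check_upper s i (check_upper s i)
def Claim_raises_check_upper : Prop := (∀ (s : String) (i : Int), Dom_check_upper s i → Raises_check_upper s i → ¬ Pre_check_upper s i) ∧ (Dom_check_upper (pvRaiseWitness_check_upper.1) (pvRaiseWitness_check_upper.2) ∧ Raises_check_upper (pvRaiseWitness_check_upper.1) (pvRaiseWitness_check_upper.2) ∧ check_upper_alt (pvRaiseWitness_check_upper.1) (pvRaiseWitness_check_upper.2) = pvRaiseWitnessOut_check_upper)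

-- ===== LEMMAS AND PROOFS =====

-- A's recursion from index n-1 counts the uppercase characters among the first n.
theorem check_upper_take (s : String) (n : Nat) (hn : n ≤ s.length) :
    check_upper s ((n : Int) - 1)
      = ((s.toList.take n).countP PySem.Chars.isupper : Int) := by
  induction n with
  | zero =>
    have h0 : ((0 : Nat) : Int) - 1 = -1 := by norm_num
    rw [h0, check_upper]
    rw [if_pos rfl]
    simp only [List.take_zero, List.countP_nil, Nat.cast_zero]
  | succ m ih =>
    have hm : m < s.toList.length := by
      rw [String.length_toList]; omega
    have hget : PySem.Str.pyGet? s ((m : Int)) = some s.toList[m] := by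
      simp
    have harg : ((m : Int) + 1) - 1 ≠ -1 := by omega
    rw [show ((Nat.succ m : Nat) : Int) - 1 = ((m : Int) + 1) - 1 by push_cast; ring]
    rw [check_upper]
    simp only [harg]
    rw [show ((m : Int) + 1) - 1 = (m : Int) by ring] at *
    rw [hget]
    have hrec := ih (Nat.le_of_succ_le hn)
    have htake : s.toList.take (m + 1) = s.toList.take m ++ [s.toList[m]] := by
      rw [List.take_add_one]
      simp [List.getElem?_eq_getElem hm]
    rw [htake, List.countP_append]
    by_cases hc : PySem.Chars.isupper s.toList[m]
    · simp [hc, hrec]; ring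
    · simp [hc, hrec]

theorem check_upper_spec : Claim_equal_check_upper := by
  intro s i _ hpre
  obtain ⟨h1, h2⟩ := hpre
  unfold Spec_check_upper check_upper_alt
  obtain ⟨n, hni, hns⟩ : ∃ n : Nat, i = (n : Int) - 1 ∧ n ≤ s.length := ⟨(i + 1).toNat, by omega, by omega⟩
  rw [hni]
  rw [show ((n : Int) - 1 + 1) = ((n : Nat) : Int) by ring]
  rw [PySem.Str.toList_slice, PySem.Chars.slice_eq_listSlice, PySem.List.slice_to_natCast]
  exact check_upper_take s n hns

theorem check_upper_raises : Claim_raises_check_upper := by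
  unfold Claim_raises_check_upper
  constructor
  · intro s i _ hr hpre
    unfold Raises_check_upper at hr
    unfold Pre_check_upper at hpre
    omega
  · refine ⟨by decide, by decide, by decide⟩

-- self-check: the stated raise witness satisfies Raises_check_upper and B's port returns the stated value there
theorem check_upper_raises_witness :
    Raises_check_upper pvRaiseWitness_check_upper.1 pvRaiseWitness_check_upper.2 ∧
    check_upper_alt pvRaiseWitness_check_upper.1 pvRaiseWitness_check_upper.2 = pvRaiseWitnessOut_check_upper :=
  ⟨check_upper_raises.2.2.1, check_upper_raises.2.2.2⟩
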